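-- pv_equiv track=rewrite | github.com/Suchithabhagavan/traning-sesion | alicebob.py | ab
-- ===== SOURCE A (Python) =====
-- def ab(nums):
--     a=sorted(nums)
--     b=set()
--     for i in a:
--         if (i-1)>0 and (i-1) not in b:
--             b.add(i-1)
--         elif i not in b:
--             b.add(i)
--         else:
--             b.add(i+1)
--     return len(b)
-- ===== SOURCE B (Python) =====
-- def ab(nums):
--     prev = None
--     count = 0
--     for i in sorted(nums):
--         start = i - 1 if i - 1 > 0 else i
--         if prev is None or prev < start:
--             prev = start
--             count += 1
--         elif prev + 1 <= i + 1:
--             prev += 1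
--             count += 1
--     return count
-- ===== Notes on version B (the rewrite author's own statement) =====
-- stated objective: alternative
-- what changed: Replaces the hash set of occupied positions with two integers (last assigned slot and a counter), exploiting that after sorting the occupied slots above the current candidate are contiguous.
import Mathlib
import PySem

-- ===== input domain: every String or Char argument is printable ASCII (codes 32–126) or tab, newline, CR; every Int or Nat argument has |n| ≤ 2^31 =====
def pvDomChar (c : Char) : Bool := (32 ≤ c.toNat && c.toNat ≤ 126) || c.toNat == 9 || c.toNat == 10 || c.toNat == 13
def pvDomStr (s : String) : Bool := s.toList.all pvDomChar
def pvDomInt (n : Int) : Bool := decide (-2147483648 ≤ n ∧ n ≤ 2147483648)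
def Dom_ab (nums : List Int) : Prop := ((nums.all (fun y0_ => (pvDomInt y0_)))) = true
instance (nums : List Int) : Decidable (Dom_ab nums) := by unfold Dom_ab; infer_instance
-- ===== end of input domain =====

-- B replaces A's hash set of occupied positions by two integers (last assigned slot, counter): alternative O(1)-space decomposition.


-- ===== PORT A =====
def abStep (b : PySem.Set Int) (i : Int) : PySem.Set Int :=
  if i - 1 > 0 ∧ (i - 1) ∉ b then PySem.Set.add b (i - 1)
  else if i ∉ b then PySem.Set.add b i
  else PySem.Set.add b (i + 1)

def ab (nums : List Int) : Int :=
  PySem.Set.len ((PySem.List.sorted nums (fun x => x) false).foldl abStep PySem.Set.empty)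

-- ===== PORT B =====
def abAltStep (st : Option Int × Int) (i : Int) : Option Int × Int :=
  let start := if i - 1 > 0 then i - 1 else i
  match st with
  | (none, count) => (some start, count + 1)
  | (some prev, count) =>
    if prev < start then (some start, count + 1)
    else if prev + 1 ≤ i + 1 then (some (prev + 1), count + 1)
    else (some prev, count)

def ab_alt (nums : List Int) : Int :=
  ((PySem.List.sorted nums (fun x => x) false).foldl abAltStep (none, 0)).2

-- ===== PRECONDITION & SPEC =====
def Spec_ab (nums : List Int) (out : Int) : Prop := out = ab_alt nums
instance (nums : List Int) (out : Int) : Decidable (Spec_ab nums out) := by unfold Spec_ab; infer_instance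

-- ===== CLAIM (what is proved, stated in full; the proofs are below) =====
def Claim_equal_ab : Prop := ∀ (nums : List Int), Dom_ab nums → Spec_ab nums (ab nums)

-- ===== LEMMAS AND PROOFS =====

-- the slot B tries first for value i (A's first branch target when available)
def abStart (i : Int) : Int := if i - 1 > 0 then i - 1 else i

theorem abStart_mono {a b : Int} (h : a ≤ b) : abStart a ≤ abStart b := by
  unfold abStart; split_ifs <;> omega

-- Invariant tying A's set to B's (prev, count) above the lower bound m:
-- the counter equals the set's size, and above m the set is exactly the slots ≤ prev.
def abInv (s : PySem.Set Int) (st : Option Int × Int) (m : Int) : Prop :=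
  st.2 = (s.length : Int) ∧
  (match st.1 with
   | none => s = []
   | some p => ∀ j : Int, m ≤ j → (j ∈ s ↔ j ≤ p))

theorem abInv_weaken {s : PySem.Set Int} {st : Option Int × Int} {m m' : Int}
    (h : abInv s st m) (hle : m ≤ m') : abInv s st m' := by
  obtain ⟨h1, h2⟩ := h
  refine ⟨h1, ?_⟩
  cases hp : st.1 with
  | none => simpa [hp] using h2
  | some p =>
    simp only [hp] at h2 ⊢
    intro j hj; exact h2 j (by omega)

theorem abInv_step (s : PySem.Set Int) (st : Option Int × Int) (i : Int)
    (h : abInv s st (abStart i)) : abInv (abStep s i) (abAltStep st i) (abStart i) := by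
  obtain ⟨st1, st2⟩ := st
  obtain ⟨h1, h2⟩ := h
  cases st1 with
  | none =>
    simp only at h2
    subst h2
    simp only at h1
    unfold abStep abAltStep abStart at *
    by_cases hg : i - 1 > 0
    · simp only [hg, true_and, List.not_mem_nil, not_false_iff, if_pos trivial,
        PySem.Set.add_of_not_mem (by simp : (i-1 : Int) ∉ ([] : List Int))]
      refine ⟨by simp at h1 ⊢; omega, ?_⟩
      intro j hj
      simp only [List.nil_append, List.mem_singleton]
      omega
    · simp only [hg, false_and, if_false, List.not_mem_nil, not_false_iff, if_pos trivial,
        PySem.Set.add_of_not_mem (by simp : (i : Int) ∉ ([] : List Int))]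
      refine ⟨by simp at h1 ⊢; omega, ?_⟩
      intro j hj
      simp only [List.nil_append, List.mem_singleton]
      omega
  | some p =>
    simp only at h1 h2
    unfold abStep abAltStep abStart at *
    by_cases hg : i - 1 > 0
    · simp only [if_pos hg] at h2 ⊢
      have hm1 : (i - 1) ∈ s ↔ i - 1 ≤ p := h2 (i-1) le_rfl
      have hmi : i ∈ s ↔ i ≤ p := h2 i (by omega)
      have hmi1 : (i + 1) ∈ s ↔ i + 1 ≤ p := h2 (i+1) (by omega)
      by_cases hc1 : p < i - 1
      · have hnm : (i - 1) ∉ s := by rw [hm1]; omega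
        rw [if_pos ⟨hg, hnm⟩, if_pos hc1, PySem.Set.add_of_not_mem hnm]
        refine ⟨by simp; omega, ?_⟩
        intro j hj
        have := h2 j hj
        simp only [List.mem_append, List.mem_singleton, this]
        omega
      · have hm : (i - 1) ∈ s := by rw [hm1]; omega
        rw [if_neg (by tauto), if_neg hc1]
        by_cases hc2 : i ∈ s
        · rw [if_neg (by simpa using hc2)]
          have hpi : i ≤ p := hmi.mp hc2
          by_cases hc3 : (i + 1) ∈ s
          · have : ¬ p + 1 ≤ i + 1 := by have := hmi1.mp hc3; omega
            rw [if_neg this, PySem.Set.add_of_mem hc3]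
            exact ⟨h1, h2⟩
          · have hp : p = i := by have := (not_iff_not.mpr hmi1).mp hc3; omega
            rw [if_pos (by omega), PySem.Set.add_of_not_mem hc3]
            refine ⟨by simp; omega, ?_⟩
            intro j hj
            have := h2 j hj
            simp only [List.mem_append, List.mem_singleton, this]
            omega
        · rw [if_pos (by simpa using hc2), PySem.Set.add_of_not_mem hc2]
          have hp : p = i - 1 := by have := (not_iff_not.mpr hmi).mp hc2; omega
          rw [if_pos (by omega)]
          refine ⟨by simp; omega, ?_⟩
          intro j hj
          have := h2 j hj
          simp only [List.mem_append, List.mem_singleton, this]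
          omega
    · simp only [if_neg hg] at h2 ⊢
      have hmi : i ∈ s ↔ i ≤ p := h2 i le_rfl
      have hmi1 : (i + 1) ∈ s ↔ i + 1 ≤ p := h2 (i+1) (by omega)
      rw [if_neg (by tauto)]
      by_cases hc2 : i ∈ s
      · rw [if_neg (by simpa using hc2)]
        have hpi : i ≤ p := hmi.mp hc2
        rw [if_neg (by omega)]
        by_cases hc3 : (i + 1) ∈ s
        · have : ¬ p + 1 ≤ i + 1 := by have := hmi1.mp hc3; omega
          rw [if_neg this, PySem.Set.add_of_mem hc3]
          exact ⟨h1, h2⟩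
        · have hp : p = i := by have := (not_iff_not.mpr hmi1).mp hc3; omega
          rw [if_pos (by omega), PySem.Set.add_of_not_mem hc3]
          refine ⟨by simp; omega, ?_⟩
          intro j hj
          have := h2 j hj
          simp only [List.mem_append, List.mem_singleton, this]
          omega
      · rw [if_pos (by simpa using hc2), PySem.Set.add_of_not_mem hc2]
        have hp : p < i := by have := (not_iff_not.mpr hmi).mp hc2; omega
        rw [if_pos hp]
        refine ⟨by simp; omega, ?_⟩
        intro j hj
        have := h2 j hj
        simp only [List.mem_append, List.mem_singleton, this]
        omega

theorem abInv_foldl (l : List Int) (s : PySem.Set Int) (st : Option Int × Int) (m : Int)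
    (hsort : l.Pairwise (· ≤ ·)) (hlb : ∀ x ∈ l, m ≤ abStart x) (h : abInv s st m) :
    ∃ m', abInv (l.foldl abStep s) (l.foldl abAltStep st) m' := by
  induction l generalizing s st m with
  | nil => exact ⟨m, h⟩
  | cons i t ih =>
    rw [List.pairwise_cons] at hsort
    have h1 : abInv s st (abStart i) :=
      abInv_weaken h (hlb i (List.mem_cons_self))
    have h2 := abInv_step s st i h1
    exact ih _ _ (abStart i) hsort.2
      (fun x hx => abStart_mono (hsort.1 x hx)) h2

-- ===== VERDICT (by name: the statement is the Claim_ definition above) =====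
theorem ab_spec : Claim_equal_ab := by
  intro nums _
  unfold Spec_ab ab ab_alt
  cases hs : PySem.List.sorted nums (fun x => x) false with
  | nil => simp [PySem.Set.len, PySem.Set.empty]
  | cons i t =>
    have hsort : (i :: t).Pairwise (· ≤ ·) := by
      have := PySem.List.sorted_pairwise nums (fun x => x)
      rwa [hs] at this
    have hinit : abInv PySem.Set.empty (none, 0) (abStart i) := by
      exact ⟨by simp [PySem.Set.empty], by simp [PySem.Set.empty]⟩
    obtain ⟨m', hm'⟩ := abInv_foldl (i :: t) PySem.Set.empty (none, 0) (abStart i)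
      hsort (fun x hx => by
        rcases List.mem_cons.mp hx with h | h
        · subst h; exact le_rfl
        · exact abStart_mono (List.rel_of_pairwise_cons hsort h)) hinit
    simpa [PySem.Set.len] using hm'.1.symm
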